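-- pv_equiv track=rewrite | github.com/Irlet/Python_SelfTraining | Multipl_first_x_even.py | multiplication_of_first_x_even_numbers
-- ===== SOURCE A (Python) =====
-- def multiplication_of_first_x_even_numbers(x, start=0):
--
--     even_numbers = []
--     if start == 0:
--         element = start + 1
--     else:
--         element = start
--     multiplicated = 1
--     if x <= 0:
--         raise ValueError('Enter positive number of elements')
--     while len(even_numbers) < x:
--         if element % 2 == 0:
--             even_numbers.append(element)
--         element += 1
--     for elem in even_numbers:
--         multiplicated *= elem
--     return multiplicated
-- ===== SOURCE B (Python) =====
-- def multiplication_of_first_x_even_numbers(x, start=0):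
--     if x <= 0:
--         raise ValueError('Enter positive number of elements')
--     if start == 0:
--         e = 2
--     elif start % 2 == 0:
--         e = start
--     else:
--         e = start + 1
--     result = 1
--     for _ in range(x):
--         result *= e
--         e += 2
--     return result
-- ===== Notes on version B (the rewrite author's own statement) =====
-- stated objective: simpler
-- what changed: B computes the first even number directly by a parity check (keeping A's start==0 -> 2 special case) and multiplies while striding by 2 in one accumulating loop, instead of A's two passes that scan every consecutive integer, test parity, append to a list and then multiply the list.
import Mathlib
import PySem

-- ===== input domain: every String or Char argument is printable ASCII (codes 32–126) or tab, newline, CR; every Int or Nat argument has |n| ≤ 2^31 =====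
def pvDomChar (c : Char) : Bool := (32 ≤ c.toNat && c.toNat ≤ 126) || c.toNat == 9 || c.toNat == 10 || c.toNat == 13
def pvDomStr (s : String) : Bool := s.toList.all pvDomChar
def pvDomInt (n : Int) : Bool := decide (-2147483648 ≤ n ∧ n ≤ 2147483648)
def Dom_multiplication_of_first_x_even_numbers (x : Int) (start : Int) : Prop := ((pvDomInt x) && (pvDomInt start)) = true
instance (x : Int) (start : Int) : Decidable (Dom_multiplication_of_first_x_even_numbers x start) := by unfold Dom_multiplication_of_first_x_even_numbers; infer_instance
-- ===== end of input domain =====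

-- B computes the first even number by a parity check and multiplies in one stride-2
-- accumulating loop, replacing A's scan-every-integer + append-list + second multiply pass (simpler).


-- ===== PORT A =====
-- A's while loop: scan consecutive integers, append the even ones until x are collected.
-- (list.append is encoded as cons onto the accumulator + one final reverse, and Python's O(1)
-- len(evens) as the carried counter `len`, for linear cost)
def pvLoopA (x : Int) (element : Int) (evens : List Int) (len : Nat) : List Int :=
  if (len : Int) < x then
    if PySem.Int.mod element 2 == 0 then
      pvLoopA x (element + 1) (element :: evens) (len + 1)
    else
      pvLoopA x (element + 1) evens len
  else evens
termination_by (2 * (x - len).toNat + (if PySem.Int.mod element 2 == 0 then 0 else 1) : Nat)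
decreasing_by
  all_goals
    rw [PySem.Int.mod_eq_emod_of_pos (by norm_num), PySem.Int.mod_eq_emod_of_pos (by norm_num)] at *
    simp_all
    first
    | omega
    | (split_ifs at * <;> omega)

def multiplication_of_first_x_even_numbers (x : Int) (start : Int) : Int :=
  let element := if start == 0 then start + 1 else start
  if x ≤ 0 then 0  -- Python raises ValueError here; excluded by Pre_
  else
    let even_numbers := (pvLoopA x element [] 0).reverse
    even_numbers.foldl (fun multiplicated elem => multiplicated * elem) 1

-- ===== PORT B =====
-- B's for loop: x multiplications, striding by 2.
def pvLoopB (n : Nat) (e : Int) (result : Int) : Int :=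
  match n with
  | 0 => result
  | m + 1 => pvLoopB m (e + 2) (result * e)

def multiplication_of_first_x_even_numbers_alt (x : Int) (start : Int) : Int :=
  if x ≤ 0 then 0  -- B raises ValueError here; excluded by Pre_
  else
    let e := if start == 0 then 2
             else if PySem.Int.mod start 2 == 0 then start
             else start + 1
    pvLoopB x.toNat e 1

-- ===== PRECONDITION & SPEC =====
-- Pre_ excludes x ≤ 0, where A (and B) raise ValueError.
def Pre_multiplication_of_first_x_even_numbers (x : Int) (start : Int) : Prop := 1 ≤ x
instance (x : Int) (start : Int) : Decidable (Pre_multiplication_of_first_x_even_numbers x start) := by unfold Pre_multiplication_of_first_x_even_numbers; infer_instance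
def pvWitness_multiplication_of_first_x_even_numbers : Int × Int := (3, 5)

def Spec_multiplication_of_first_x_even_numbers (x : Int) (start : Int) (out : Int) : Prop := out = multiplication_of_first_x_even_numbers_alt x start
instance (x : Int) (start : Int) (out : Int) : Decidable (Spec_multiplication_of_first_x_even_numbers x start out) := by unfold Spec_multiplication_of_first_x_even_numbers; infer_instance

-- ===== CLAIM (what is proved, stated in full; the proofs are below) =====
def Claim_equal_multiplication_of_first_x_even_numbers : Prop := ∀ (x : Int) (start : Int), Dom_multiplication_of_first_x_even_numbers x start → Pre_multiplication_of_first_x_even_numbers x start → Spec_multiplication_of_first_x_even_numbers x start (multiplication_of_first_x_even_numbers x start)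

-- ===== LEMMAS AND PROOFS =====

theorem pvModTwo_eq (a : Int) : (PySem.Int.mod a 2 == 0) = (a % 2 == 0) := by
  rw [PySem.Int.mod_eq_emod_of_pos (by norm_num)]

-- The list of n even numbers e, e+2, … (for even e).
def pvEvens (e : Int) (n : Nat) : List Int :=
  match n with
  | 0 => []
  | m + 1 => e :: pvEvens (e + 2) m

theorem pvLoopA_even (n : Nat) : ∀ (x e : Int) (acc : List Int) (len : Nat),
    e % 2 = 0 → (len : Int) + n = x →
    pvLoopA x e acc len = (pvEvens e n).reverse ++ acc := by
  induction n with
  | zero =>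
    intro x e acc len he hlen
    rw [pvLoopA, if_neg (by omega)]
    simp [pvEvens]
  | succ m ih =>
    intro x e acc len he hlen
    rw [pvLoopA]
    have h1 : (len : Int) < x := by omega
    have he' : PySem.Int.mod e 2 == 0 := by
      rw [pvModTwo_eq]; simpa using he
    rw [if_pos h1, if_pos he']
    -- after appending e, element e+1 is odd; one more unfold
    rw [pvLoopA]
    by_cases hm : m = 0
    · subst hm
      have : ¬ (((len + 1 : Nat) : Int) < x) := by push_cast; omega
      rw [if_neg this]
      simp [pvEvens]
    · obtain ⟨k, rfl⟩ : ∃ k, m = k + 1 := ⟨m - 1, by omega⟩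
      have h2 : (((len + 1 : Nat) : Int)) < x := by push_cast; omega
      have hodd : ¬ (PySem.Int.mod (e + 1) 2 == 0) := by
        rw [pvModTwo_eq]; simp; omega
      rw [if_pos h2, if_neg hodd]
      have := ih x (e + 1 + 1) (e :: acc) (len + 1) (by omega) (by push_cast; omega)
      rw [this]
      have h21 : e + 1 + 1 = e + 2 := by ring
      simp [pvEvens, h21]

theorem pvLoopB_foldl (n : Nat) : ∀ (e acc : Int),
    (pvEvens e n).foldl (fun m el => m * el) acc = pvLoopB n e acc := by
  induction n with
  | zero => intro e acc; simp [pvEvens, pvLoopB]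
  | succ m ih => intro e acc; simp [pvEvens, pvLoopB, ih]

-- ===== VERDICT (by name: the statement is the Claim_ definition above) =====
theorem multiplication_of_first_x_even_numbers_spec : Claim_equal_multiplication_of_first_x_even_numbers := by
  intro x start _ hpre
  have hx1 : 1 ≤ x := hpre
  unfold Spec_multiplication_of_first_x_even_numbers
  unfold multiplication_of_first_x_even_numbers multiplication_of_first_x_even_numbers_alt
  have hx : ¬ (x ≤ 0) := by exact not_le.mpr (by omega)
  rw [if_neg hx, if_neg hx]
  have hn : ((([] : List Int).length : Int)) + x.toNat = x := by
    simp only [List.length_nil, Nat.cast_zero, zero_add]; omega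
  -- the first even number B starts from
  set e0 : Int := if start == 0 then start + 1 else start with he0
  set f : Int := if start == 0 then 2
                 else if PySem.Int.mod start 2 == 0 then start
                 else start + 1 with hf
  have key : (pvLoopA x e0 [] 0).reverse = pvEvens f x.toNat := by
    suffices h : pvLoopA x e0 [] 0 = (pvEvens f x.toNat).reverse ++ [] by
      rw [h]; simp
    by_cases hs0 : start = 0
    · -- e0 = 1, odd: one unfold, then the even lemma from f = 2
      subst hs0
      simp only [he0, hf, beq_self_eq_true, if_pos]
      rw [pvLoopA]
      have h1 : (((0 : Nat)) : Int) < x := by simp; omega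
      have hodd : ¬ (PySem.Int.mod (0 + 1) 2 == 0) := by
        rw [pvModTwo_eq]; decide
      rw [if_pos h1, if_neg hodd]
      have := pvLoopA_even x.toNat x (0 + 1 + 1) [] 0 (by decide) (by simp only [List.length_nil, Nat.cast_zero, zero_add]; omega)
      rw [this]; norm_num
    · have hsne : (start == 0) = false := by simp [hs0]
      simp only [he0, hf, hsne, Bool.false_eq_true, if_false]
      by_cases hev : start % 2 = 0
      · -- start even: lemma applies directly
        have hevb : (PySem.Int.mod start 2 == 0) = true := by
          rw [pvModTwo_eq]; simpa using hev
        rw [if_pos hevb]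
        exact pvLoopA_even x.toNat x start [] 0 hev (by simp only [List.length_nil, Nat.cast_zero, zero_add] at hn ⊢; omega)
      · -- start odd: one unfold, then from start + 1
        have hevb : ¬ ((PySem.Int.mod start 2 == 0) = true) := by
          rw [pvModTwo_eq]; simpa using hev
        rw [if_neg hevb]
        rw [pvLoopA]
        have h1 : (((0 : Nat)) : Int) < x := by simp; omega
        rw [if_pos h1, if_neg hevb]
        exact pvLoopA_even x.toNat x (start + 1) [] 0 (by omega) (by simp only [List.length_nil, Nat.cast_zero, zero_add]; omega)
  rw [key, pvLoopB_foldl]
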